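-- pv_equiv track=rewrite | github.com/HungBacktracking/IntroductionToAI-Lab1 | source/implement.py | getStartEndPoint
-- ===== SOURCE A (Python) =====
-- def getStartEndPoint(matrix):
--     for i in range(len(matrix)):
--         for j in range(len(matrix[0])):
--             if matrix[i][j]=='S':
--                 start=(i,j)
--
--             elif matrix[i][j]==' ':
--                 if (i==0) or (i==len(matrix)-1) or (j==0) or (j==len(matrix[0])-1):
--                     end=(i,j)
--
--             else:
--                 pass
--
--     return start, end
-- ===== SOURCE B (Python) =====
-- def getStartEndPoint(matrix):
--     n = len(matrix)
--     w = len(matrix[0])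
--     # pass 1: last 'S' in row-major order
--     for i in range(n):
--         row = matrix[i]
--         for j in range(w):
--             if row[j] == 'S':
--                 start = (i, j)
--     # pass 2: last border blank, walking only the perimeter in row-major order
--     for j in range(w):
--         if matrix[0][j] == ' ':
--             end = (0, j)
--     for i in range(1, n - 1):
--         if matrix[i][0] == ' ':
--             end = (i, 0)
--         if w > 1 and matrix[i][w - 1] == ' ':
--             end = (i, w - 1)
--     if n > 1:
--         for j in range(w):
--             if matrix[n - 1][j] == ' ':
--                 end = (n - 1, j)
--     return start, end
-- ===== Notes on version B (the rewrite author's own statement) =====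
-- stated objective: alternative
-- what changed: A makes one full-grid scan testing the border condition on every blank cell; B does two passes: a row-major scan for the last 'S', then a walk of only the perimeter cells (top row, middle-row edges, bottom row) in row-major order for the last border blank.
import Mathlib
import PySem

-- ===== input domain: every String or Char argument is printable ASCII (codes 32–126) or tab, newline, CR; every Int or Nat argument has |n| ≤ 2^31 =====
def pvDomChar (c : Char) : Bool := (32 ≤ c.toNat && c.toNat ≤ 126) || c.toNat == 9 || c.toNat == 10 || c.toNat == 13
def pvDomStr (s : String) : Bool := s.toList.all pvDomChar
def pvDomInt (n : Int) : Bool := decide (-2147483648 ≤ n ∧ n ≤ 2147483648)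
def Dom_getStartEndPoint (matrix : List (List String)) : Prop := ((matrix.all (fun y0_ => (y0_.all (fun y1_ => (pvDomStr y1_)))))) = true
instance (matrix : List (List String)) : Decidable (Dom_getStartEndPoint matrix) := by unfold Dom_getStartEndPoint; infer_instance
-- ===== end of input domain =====

-- B replaces A's single full-grid scan (which re-tests the border condition on every interior
-- cell) by two passes: a row-major scan for the last 'S', then a walk of ONLY the perimeter
-- cells in row-major order for the last border blank (objective: alternative decomposition).

-- `none` = the Python variable is still unassigned (NameError on return, excluded by Pre_).
def optToPair (o : Option (Nat × Nat)) : Int × Int :=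
  match o with
  | some (i, j) => ((i : Int), (j : Int))
  | none => (0, 0)

-- ===== PORT A =====
def getStartEndPoint (matrix : List (List String)) : (Int × Int) × (Int × Int) :=
  let n := matrix.length
  let w := (matrix.headD []).length
  let res := ((List.range n).flatMap (fun i => (List.range w).map (fun j => (i, j)))).foldl
    (fun (st : Option (Nat × Nat) × Option (Nat × Nat)) p =>
      if (matrix.getD p.1 []).getD p.2 "" = "S" then (some p, st.2)
      else if (matrix.getD p.1 []).getD p.2 "" = " " then
        (if p.1 = 0 ∨ p.1 = n - 1 ∨ p.2 = 0 ∨ p.2 = w - 1 then (st.1, some p) else st)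
      else st) (none, none)
  (optToPair res.1, optToPair res.2)

-- ===== PORT B =====
def getStartEndPoint_alt (matrix : List (List String)) : (Int × Int) × (Int × Int) :=
  let n := matrix.length
  let w := (matrix.headD []).length
  let start := ((List.range n).flatMap (fun i => (List.range w).map (fun j => (i, j)))).foldl
    (fun (acc : Option (Nat × Nat)) p =>
      if (matrix.getD p.1 []).getD p.2 "" = "S" then some p else acc) none
  let e1 := (List.range w).foldl
    (fun (acc : Option (Nat × Nat)) j =>
      if (matrix.getD 0 []).getD j "" = " " then some (0, j) else acc) none
  let e2 := (List.range' 1 (n - 2)).foldl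
    (fun (acc : Option (Nat × Nat)) i =>
      let acc' := if (matrix.getD i []).getD 0 "" = " " then some (i, 0) else acc
      if 1 < w ∧ (matrix.getD i []).getD (w - 1) "" = " " then some (i, w - 1) else acc') e1
  let e3 := if 1 < n then
      (List.range w).foldl
        (fun (acc : Option (Nat × Nat)) j =>
          if (matrix.getD (n - 1) []).getD j "" = " " then some (n - 1, j) else acc) e2
    else e2
  (optToPair start, optToPair e3)

-- ===== PRECONDITION & SPEC =====
-- Pre_ = exactly the inputs on which Python A returns: nonempty matrix, every row at least as
-- long as row 0 (else IndexError), and both an 'S' and a border blank inside the scanned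
-- region (else NameError).
def Pre_getStartEndPoint (matrix : List (List String)) : Prop :=
  matrix ≠ [] ∧
  (∀ row ∈ matrix, (matrix.headD []).length ≤ row.length) ∧
  (∃ i < matrix.length, ∃ j < (matrix.headD []).length,
      (matrix.getD i []).getD j "" = "S") ∧
  (∃ i < matrix.length, ∃ j < (matrix.headD []).length,
      (matrix.getD i []).getD j "" = " " ∧
      (i = 0 ∨ i = matrix.length - 1 ∨ j = 0 ∨ j = (matrix.headD []).length - 1))
instance (matrix : List (List String)) : Decidable (Pre_getStartEndPoint matrix) := by
  unfold Pre_getStartEndPoint; infer_instance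

def pvWitness_getStartEndPoint : List (List String) := [["S", " "]]

def Spec_getStartEndPoint (matrix : List (List String)) (out : (Int × Int) × (Int × Int)) : Prop := out = getStartEndPoint_alt matrix
instance (matrix : List (List String)) (out : (Int × Int) × (Int × Int)) : Decidable (Spec_getStartEndPoint matrix out) := by unfold Spec_getStartEndPoint; infer_instance

-- ===== CLAIM (what is proved, stated in full; the proofs are below) =====
def Claim_equal_getStartEndPoint : Prop := ∀ (matrix : List (List String)), Dom_getStartEndPoint matrix → Pre_getStartEndPoint matrix → Spec_getStartEndPoint matrix (getStartEndPoint matrix)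

-- ===== LEMMAS AND PROOFS =====

-- "last cell satisfying c wins" fold
def lastU {α : Type} (c : α → Prop) [DecidablePred c] (l : List α) (init : Option α) : Option α :=
  l.foldl (fun acc p => if c p then some p else acc) init

theorem lastU_append {α : Type} (c : α → Prop) [DecidablePred c] (l₁ l₂ : List α) (init : Option α) :
    lastU c (l₁ ++ l₂) init = lastU c l₂ (lastU c l₁ init) := by
  simp [lastU, List.foldl_append]

theorem lastU_congr {α : Type} (c₁ c₂ : α → Prop) [DecidablePred c₁] [DecidablePred c₂]
    (l : List α) (h : ∀ p ∈ l, (c₁ p ↔ c₂ p)) (init : Option α) :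
    lastU c₁ l init = lastU c₂ l init := by
  induction l generalizing init with
  | nil => rfl
  | cons hd tl ih =>
    simp only [lastU, List.foldl_cons] at *
    rw [show (if c₁ hd then some hd else init) = (if c₂ hd then some hd else init) by
      simp [h hd (by simp)]]
    exact ih (fun p hp => h p (by simp [hp])) _

theorem lastU_filter {α : Type} (c b : α → Prop) [DecidablePred c] [DecidablePred b]
    (l : List α) (h : ∀ p, c p → b p) (init : Option α) :
    lastU c (l.filter (fun p => decide (b p))) init = lastU c l init := by
  induction l generalizing init with
  | nil => rfl
  | cons hd tl ih =>
    by_cases hb : b hd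
    · simp only [List.filter_cons, hb, decide_true, if_true, lastU, List.foldl_cons] at *
      exact ih _
    · have hc : ¬ c hd := fun hh => hb (h hd hh)
      simp only [List.filter_cons, hb, decide_false, if_false, lastU, List.foldl_cons, hc] at *
      exact ih _

-- A's paired fold splits into two independent lastU folds
theorem pair_split (f : Nat × Nat → String) (brd : Nat × Nat → Prop) [DecidablePred brd]
    (l : List (Nat × Nat)) :
    ∀ s e : Option (Nat × Nat),
    l.foldl (fun st p =>
        if f p = "S" then (some p, st.2)
        else if f p = " " then (if brd p then (st.1, some p) else st)
        else st) (s, e)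
      = (lastU (fun p => f p = "S") l s, lastU (fun p => f p = " " ∧ brd p) l e) := by
  induction l with
  | nil => intro s e; rfl
  | cons hd tl ih =>
    intro s e
    simp only [List.foldl_cons, lastU, List.foldl_cons] at *
    by_cases h1 : f hd = "S"
    · have h2 : ¬ (f hd = " " ∧ brd hd) := by
        rintro ⟨h2, -⟩; rw [h1] at h2; exact absurd h2 (by decide)
      simp only [h1, if_pos trivial]
      exact ih _ _
    · by_cases h2 : f hd = " "
      · by_cases h3 : brd hd
        · simp only [h2, h3]
          exact ih _ _
        · have h4 : ¬ (f hd = " " ∧ brd hd) := fun hh => h3 hh.2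
          simp only [h2, h3]
          exact ih _ _
      · have h4 : ¬ (f hd = " " ∧ brd hd) := fun hh => h2 hh.1
        simp only [h1, h2]
        exact ih _ _

-- folding per-element lastU chunks = lastU of the flattened list
theorem lastU_flatMap {β : Type} (c : Nat × Nat → Prop) [DecidablePred c]
    (g : β → List (Nat × Nat)) (l : List β) (init : Option (Nat × Nat)) :
    l.foldl (fun acc x => lastU c (g x) acc) init = lastU c (l.flatMap g) init := by
  induction l generalizing init with
  | nil => rfl
  | cons hd tl ih => simp [List.flatMap_cons, lastU_append, ih]

-- single-element filter of a range'
theorem filter_range'_eq (m : Nat) : ∀ (k a : Nat),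
    (List.range' a k).filter (fun j => decide (j = m)) =
      if a ≤ m ∧ m < a + k then [m] else [] := by
  intro k
  induction k with
  | zero =>
    intro a
    rw [if_neg (by omega)]
    rfl
  | succ k ih =>
    intro a
    rw [List.range'_succ, List.filter_cons]
    by_cases ha : a = m
    · subst ha
      rw [if_pos (by simp), ih (a + 1), if_neg (by omega), if_pos (by omega)]
    · rw [if_neg (by simp [ha]), ih (a + 1)]
      by_cases h : a + 1 ≤ m ∧ m < a + 1 + k
      · rw [if_pos h, if_pos (by omega)]
      · rw [if_neg h, if_neg (by omega)]

-- a full border row (i = 0 or i = n-1) survives the filter unchanged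
theorem row_filter_full (w i : Nat) (c : Nat × Nat → Bool) (hc : ∀ j, c (i, j) = true) :
    ((List.range w).map (fun j => (i, j))).filter c = (List.range w).map (fun j => (i, j)) := by
  rw [List.filter_eq_self]
  intro p hp
  simp only [List.mem_map] at hp
  obtain ⟨j, -, rfl⟩ := hp
  exact hc j

-- a middle row keeps exactly its two edge cells (one cell if w = 1)
theorem row_filter_mid (n w i : Nat) (hi0 : i ≠ 0) (hi1 : i ≠ n - 1) (hw : 1 ≤ w) :
    ((List.range w).map (fun j => (i, j))).filter
        (fun p => decide (p.1 = 0 ∨ p.1 = n - 1 ∨ p.2 = 0 ∨ p.2 = w - 1))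
      = (i, 0) :: (if 1 < w then [(i, w - 1)] else []) := by
  rw [List.filter_map]
  have hcomp : ((fun p : Nat × Nat => decide (p.1 = 0 ∨ p.1 = n - 1 ∨ p.2 = 0 ∨ p.2 = w - 1)) ∘
      (fun j => (i, j))) = fun j => decide (j = 0 ∨ j = w - 1) := by
    funext j
    simp [Function.comp, hi0, hi1]
  rw [hcomp]
  have hr : List.range w = 0 :: List.range' 1 (w - 1) := by
    rw [List.range_eq_range']
    cases w with
    | zero => omega
    | succ w' => rw [List.range'_succ]; norm_num
  rw [hr, List.filter_cons, if_pos (by simp)]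
  have ht : (List.range' 1 (w - 1)).filter (fun j => decide (j = 0 ∨ j = w - 1))
      = (List.range' 1 (w - 1)).filter (fun j => decide (j = w - 1)) := by
    apply List.filter_congr
    intro j hj
    rw [List.mem_range'_1] at hj
    simp [show j ≠ 0 by omega]
  rw [ht, filter_range'_eq]
  by_cases h2 : 1 < w
  · rw [if_pos (by omega), if_pos h2]
    simp
  · rw [if_neg (by omega), if_neg h2]
    simp

-- the border cells of the grid, in row-major order, are exactly B's perimeter walk
theorem border_filter (n w : Nat) (hn : 1 ≤ n) (hw : 1 ≤ w) :
    (((List.range n).flatMap (fun i => (List.range w).map (fun j => (i, j)))).filter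
        (fun p => decide (p.1 = 0 ∨ p.1 = n - 1 ∨ p.2 = 0 ∨ p.2 = w - 1)))
      = ((List.range w).map (fun j => ((0 : Nat), j)))
        ++ (List.range' 1 (n - 2)).flatMap (fun i => (i, 0) :: (if 1 < w then [(i, w - 1)] else []))
        ++ (if 1 < n then (List.range w).map (fun j => (n - 1, j)) else []) := by
  rw [List.filter_flatMap]
  by_cases hn2 : 1 < n
  · have hsplit : List.range n = (List.range' 0 1 ++ List.range' 1 (n - 2)) ++ List.range' (n - 1) 1 := by
      rw [List.range_eq_range']
      conv_lhs => rw [show n = (1 + (n - 2)) + 1 by omega]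
      rw [← List.range'_append, ← List.range'_append]
      simp only [Nat.one_mul, Nat.zero_add]
      rw [show 1 + (n - 2) = n - 1 by omega]
    rw [hsplit, List.flatMap_append, List.flatMap_append]
    congr 1
    · congr 1
      · simp only [List.range'_one, List.flatMap_cons, List.flatMap_nil, List.append_nil]
        exact row_filter_full w 0 _ (by simp)
      · exact List.flatMap_congr (fun i hi => by
          rw [List.mem_range'_1] at hi
          exact row_filter_mid n w i (by omega) (by omega) hw)
    · simp only [List.range'_one, List.flatMap_cons, List.flatMap_nil, List.append_nil,
        if_pos hn2]
      exact row_filter_full w (n - 1) _ (by simp)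
  · have hn1 : n = 1 := by omega
    subst hn1
    simp only [show (1:Nat) - 2 = 0 from rfl, List.range'_zero, List.flatMap_nil, if_neg hn2,
      List.append_nil]
    have : List.range 1 = [0] := rfl
    rw [this]
    simp only [List.flatMap_cons, List.flatMap_nil, List.append_nil]
    exact row_filter_full w 0 _ (by simp)


-- A's "last border blank" over the full grid equals B's perimeter walk
theorem end_eq (matrix : List (List String)) (n w : Nat) (hn : 1 ≤ n) (hw : 1 ≤ w) :
    lastU (fun p : Nat × Nat => (matrix.getD p.1 []).getD p.2 "" = " " ∧
        (p.1 = 0 ∨ p.1 = n - 1 ∨ p.2 = 0 ∨ p.2 = w - 1))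
      (List.flatMap (fun i => List.map (fun j => (i, j)) (List.range w)) (List.range n)) none
    = (if 1 < n then
        List.foldl (fun acc j => if (matrix.getD (n - 1) []).getD j "" = " " then some (n - 1, j) else acc)
          (List.foldl
            (fun acc i =>
              if 1 < w ∧ (matrix.getD i []).getD (w - 1) "" = " " then some (i, w - 1)
              else if (matrix.getD i []).getD 0 "" = " " then some (i, 0) else acc)
            (List.foldl (fun acc j => if (matrix.getD 0 []).getD j "" = " " then some (0, j) else acc) none
              (List.range w))
            (List.range' 1 (n - 2)))
          (List.range w)
      else
        List.foldl
          (fun acc i =>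
            if 1 < w ∧ (matrix.getD i []).getD (w - 1) "" = " " then some (i, w - 1)
            else if (matrix.getD i []).getD 0 "" = " " then some (i, 0) else acc)
          (List.foldl (fun acc j => if (matrix.getD 0 []).getD j "" = " " then some (0, j) else acc) none
            (List.range w))
          (List.range' 1 (n - 2))) := by
  have hfil := lastU_filter
    (fun p : Nat × Nat => (matrix.getD p.1 []).getD p.2 "" = " " ∧
        (p.1 = 0 ∨ p.1 = n - 1 ∨ p.2 = 0 ∨ p.2 = w - 1))
    (fun p : Nat × Nat => p.1 = 0 ∨ p.1 = n - 1 ∨ p.2 = 0 ∨ p.2 = w - 1)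
    (List.flatMap (fun i => List.map (fun j => (i, j)) (List.range w)) (List.range n))
    (fun p hp => hp.2) none
  rw [← hfil, border_filter n w hn hw]
  rw [lastU_congr _ (fun p : Nat × Nat => (matrix.getD p.1 []).getD p.2 "" = " ") _ ?mem none]
  case mem =>
    intro p hp
    constructor
    · exact fun h => h.1
    · intro h
      refine ⟨h, ?_⟩
      simp only [List.mem_append, List.mem_map, List.mem_flatMap, List.mem_range,
        List.mem_range'_1, List.mem_cons] at hp
      rcases hp with (⟨j, -, rfl⟩ | ⟨i, hi, hpi⟩) | hb
      · left; rfl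
      · rcases hpi with rfl | hpi
        · right; right; left; rfl
        · by_cases h2 : 1 < w
          · rw [if_pos h2] at hpi
            simp only [List.mem_singleton] at hpi
            subst hpi
            right; right; right; rfl
          · rw [if_neg h2] at hpi
            simp at hpi
      · by_cases hn2 : 1 < n
        · rw [if_pos hn2] at hb
          simp only [List.mem_map] at hb
          obtain ⟨j, -, rfl⟩ := hb
          right; left; rfl
        · rw [if_neg hn2] at hb
          simp at hb
  rw [lastU_append, lastU_append]
  have hrow0 : lastU (fun p : Nat × Nat => (matrix.getD p.1 []).getD p.2 "" = " ")
      (List.map (fun j => ((0 : Nat), j)) (List.range w)) none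
      = List.foldl (fun acc j => if (matrix.getD 0 []).getD j "" = " " then some (0, j) else acc) none
          (List.range w) := by
    simp [lastU, List.foldl_map]
  have hbody : (fun (acc : Option (Nat × Nat)) (i : Nat) =>
        lastU (fun p : Nat × Nat => (matrix.getD p.1 []).getD p.2 "" = " ")
          ((i, 0) :: if 1 < w then [(i, w - 1)] else []) acc)
      = (fun acc i =>
          if 1 < w ∧ (matrix.getD i []).getD (w - 1) "" = " " then some (i, w - 1)
          else if (matrix.getD i []).getD 0 "" = " " then some (i, 0) else acc) := by
    funext acc i
    by_cases h2 : 1 < w <;> simp [lastU, h2]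
  rw [← lastU_flatMap, hbody, hrow0]
  by_cases hn2 : 1 < n
  · rw [if_pos hn2, if_pos hn2]
    simp [lastU, List.foldl_map]
  · rw [if_neg hn2, if_neg hn2]
    rfl

-- ===== VERDICT (by name: the statement is the Claim_ definition above) =====
theorem getStartEndPoint_spec : Claim_equal_getStartEndPoint := by
  intro matrix _ hpre
  obtain ⟨h1, -, hS, -⟩ := hpre
  have hn : 1 ≤ matrix.length := List.length_pos_of_ne_nil h1
  have hw : 1 ≤ (matrix.headD []).length := by
    obtain ⟨i, -, j, hj, -⟩ := hS; omega
  unfold Spec_getStartEndPoint getStartEndPoint getStartEndPoint_alt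
  simp only [pair_split]
  refine Prod.ext rfl ?_
  show optToPair _ = optToPair _
  rw [end_eq matrix matrix.length (matrix.headD []).length hn hw]
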